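-- pv_equiv track=rewrite | github.com/sutazai/sutazaiapp | comprehensive_security_report_generator.py | prioritize_vulnerabilities
-- ===== SOURCE A (Python) =====
-- from collections import defaultdict, Counter
--
-- def prioritize_vulnerabilities(vulnerabilities):
--     """Prioritize vulnerabilities for remediation"""
--     priority_map = {'CRITICAL': 4, 'HIGH': 3, 'MEDIUM': 2, 'LOW': 1}
--
--     # Group by severity and category
--     prioritized = defaultdict(list)
--     for vuln in vulnerabilities:
--         priority_score = priority_map.get(vuln['severity'], 1)
--         prioritized[priority_score].append(vuln)
--
--     # Create prioritized list
--     remediation_priority = []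
--     for priority in sorted(prioritized.keys(), reverse=True):
--         remediation_priority.extend(prioritized[priority][:5])  # Top 5 per priority level
--
--     return remediation_priority[:20]  # Top 20 overall
-- ===== SOURCE B (Python) =====
-- def prioritize_vulnerabilities(vulnerabilities):
--     """Prioritize vulnerabilities for remediation"""
--     priority_map = {'CRITICAL': 4, 'HIGH': 3, 'MEDIUM': 2, 'LOW': 1}
--     out = []
--     for score in (4, 3, 2, 1):
--         out += [v for v in vulnerabilities
--                 if priority_map.get(v['severity'], 1) == score][:5]
--     return out[:20]
-- ===== Notes on version B (the rewrite author's own statement) =====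
-- stated objective: simpler
-- what changed: Replaces the defaultdict grouping plus key-sort plus extend loop with four direct filtered scans (one per priority level, highest first), each capped at 5; no dict and no sort are built. Pre_ excludes vulnerability dicts lacking a 'severity' key, on which A (and B) raise KeyError.
import Mathlib
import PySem

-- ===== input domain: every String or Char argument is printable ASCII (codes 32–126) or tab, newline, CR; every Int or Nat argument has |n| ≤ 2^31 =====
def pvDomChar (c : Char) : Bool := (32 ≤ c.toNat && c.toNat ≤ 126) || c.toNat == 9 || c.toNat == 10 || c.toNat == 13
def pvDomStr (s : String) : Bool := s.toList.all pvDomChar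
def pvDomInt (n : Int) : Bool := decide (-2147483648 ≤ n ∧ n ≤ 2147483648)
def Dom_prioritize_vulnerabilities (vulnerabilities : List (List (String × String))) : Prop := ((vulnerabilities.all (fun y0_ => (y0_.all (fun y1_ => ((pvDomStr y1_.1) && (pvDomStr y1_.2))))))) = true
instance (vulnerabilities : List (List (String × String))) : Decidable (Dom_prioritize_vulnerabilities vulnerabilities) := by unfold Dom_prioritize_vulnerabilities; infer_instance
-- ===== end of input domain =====

-- B replaces A's defaultdict grouping + key sort + extend loop with four direct filtered scans (one per level, highest first), each capped at 5 — simpler.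


-- ===== PORT A =====
-- vuln['severity']: first-match lookup in the association list (a Python dict)
def pvGetSev? (v : List (String × String)) : Option String :=
  match v with
  | [] => none
  | (k, x) :: rest => if k == "severity" then some x else pvGetSev? rest

-- priority_map.get(sev, 1) where priority_map = {'CRITICAL':4,'HIGH':3,'MEDIUM':2,'LOW':1}
def pvScore (sev : String) : Int :=
  if sev == "CRITICAL" then 4 else if sev == "HIGH" then 3
  else if sev == "MEDIUM" then 2 else if sev == "LOW" then 1 else 1

def prioritize_vulnerabilities (vulnerabilities : List (List (String × String))) : List (List (String × String)) :=
  -- prioritized = defaultdict(list); for vuln: prioritized[score].append(vuln)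
  let prioritized : PySem.Dict Int (List (List (String × String))) :=
    vulnerabilities.foldl (fun d vuln =>
      match pvGetSev? vuln with
      | some sev => d.modify (pvScore sev) [] (fun l => l ++ [vuln])
      | none => d) PySem.Dict.empty  -- none = KeyError in Python; excluded by Pre_
  -- for priority in sorted(prioritized.keys(), reverse=True): extend(prioritized[priority][:5])
  let remediation_priority :=
    (PySem.List.sorted prioritized.keys (fun k => k) true).foldl
      (fun acc priority => acc ++ (prioritized.getD priority []).take 5) []  -- [:5] = take 5
  remediation_priority.take 20  -- [:20] = take 20

-- ===== PORT B =====
def prioritize_vulnerabilities_alt (vulnerabilities : List (List (String × String))) : List (List (String × String)) :=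
  -- for score in (4,3,2,1): out += [v for v in vulnerabilities if priority_map.get(v['severity'],1) == score][:5]
  (([4, 3, 2, 1] : List Int).foldl (fun out score =>
      out ++ (vulnerabilities.filter (fun v =>
        (match pvGetSev? v with
         | some sev => pvScore sev
         | none => 0) == score)).take 5) []).take 20  -- none = KeyError; excluded by Pre_

-- ===== PRECONDITION & SPEC =====
-- Pre_ excludes inputs where some vulnerability dict lacks a 'severity' key: there Python A (and B) raise KeyError.
def Pre_prioritize_vulnerabilities (vulnerabilities : List (List (String × String))) : Prop :=
  ∀ v ∈ vulnerabilities, "severity" ∈ v.map Prod.fst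
instance (vulnerabilities : List (List (String × String))) : Decidable (Pre_prioritize_vulnerabilities vulnerabilities) := by unfold Pre_prioritize_vulnerabilities; infer_instance

def pvWitness_prioritize_vulnerabilities : (List (List (String × String))) :=
  [[("severity", "HIGH"), ("id", "1")], [("severity", "LOW")]]

def Spec_prioritize_vulnerabilities (vulnerabilities : List (List (String × String))) (out : List (List (String × String))) : Prop := out = prioritize_vulnerabilities_alt vulnerabilities
instance (vulnerabilities : List (List (String × String))) (out : List (List (String × String))) : Decidable (Spec_prioritize_vulnerabilities vulnerabilities out) := by unfold Spec_prioritize_vulnerabilities; infer_instance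

-- ===== CLAIM (what is proved, stated in full; the proofs are below) =====
def Claim_equal_prioritize_vulnerabilities : Prop := ∀ (vulnerabilities : List (List (String × String))), Dom_prioritize_vulnerabilities vulnerabilities → Pre_prioritize_vulnerabilities vulnerabilities → Spec_prioritize_vulnerabilities vulnerabilities (prioritize_vulnerabilities vulnerabilities)

-- ===== LEMMAS AND PROOFS =====

-- the priority score of a vulnerability (proof-side abbreviation; the `none` branch is unreachable under Pre_)
def pvSc (v : List (String × String)) : Int :=
  match pvGetSev? v with
  | some sev => pvScore sev
  | none => 1

theorem pvSc_range (v : List (String × String)) : pvSc v = 4 ∨ pvSc v = 3 ∨ pvSc v = 2 ∨ pvSc v = 1 := by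
  unfold pvSc pvScore
  cases h : pvGetSev? v with
  | none => simp
  | some s =>
    dsimp only
    split_ifs <;> simp

theorem pvGetSev?_isSome (v : List (String × String)) (h : "severity" ∈ v.map Prod.fst) :
    ∃ s, pvGetSev? v = some s := by
  induction v with
  | nil => simp at h
  | cons hd tl ih =>
    unfold pvGetSev?
    by_cases hk : hd.1 == "severity"
    · exact ⟨hd.2, by simp [hk]⟩
    · simp only [hk]
      apply ih
      simp only [List.map_cons, List.mem_cons] at h
      rcases h with h | h
      · exact absurd (beq_iff_eq.mpr h.symm) (by simpa using hk)
      · exact h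

theorem flatMap_filter_of_empty {α : Type} (l : List Int) (p : Int → Bool) (g : Int → List α)
    (h : ∀ k ∈ l, p k = false → g k = []) :
    (l.filter p).flatMap g = l.flatMap g := by
  induction l with
  | nil => rfl
  | cons hd tl ih =>
    cases hp : p hd with
    | true =>
      simp only [List.filter_cons, hp, if_true, List.flatMap_cons]
      rw [ih (fun k hk => h k (List.mem_cons_of_mem _ hk))]
    | false =>
      simp only [List.filter_cons, hp, Bool.false_eq_true, if_false, List.flatMap_cons,
        h hd (List.mem_cons_self) hp, List.nil_append]
      exact ih (fun k hk => h k (List.mem_cons_of_mem _ hk))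

theorem set_update_nil_eq_ofList (xs : List Int) :
    PySem.Set.update ([] : PySem.Set Int) xs = PySem.Set.ofList xs := rfl

-- ===== VERDICT (by name: the statement is the Claim_ definition above) =====
theorem prioritize_vulnerabilities_spec : Claim_equal_prioritize_vulnerabilities := by
  intro vulns _ hpre
  unfold Spec_prioritize_vulnerabilities prioritize_vulnerabilities prioritize_vulnerabilities_alt
  -- A's grouping fold, rewritten over pairs (score, vuln)
  have h1 : vulns.foldl (fun d vuln =>
        match pvGetSev? vuln with
        | some sev => d.modify (pvScore sev) [] (fun l => l ++ [vuln])
        | none => d) PySem.Dict.empty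
      = (vulns.map (fun v => (pvSc v, v))).foldl
          (fun d p => d.modify p.1 [] (fun l => l ++ [p.2])) PySem.Dict.empty := by
    rw [List.foldl_map]
    apply PySem.List.foldl_congr_mem
    intro acc x hx
    obtain ⟨s, hs⟩ := pvGetSev?_isSome x (hpre x hx)
    simp only [hs, pvSc]
  dsimp only
  set D : PySem.Dict Int (List (List (String × String))) :=
    (vulns.map (fun v => (pvSc v, v))).foldl
      (fun d p => d.modify p.1 [] (fun l => l ++ [p.2])) PySem.Dict.empty with hD
  rw [h1]
  -- each group is a filter of the input
  have hgetD : ∀ c : Int, D.getD c [] = vulns.filter (fun v => pvSc v == c) := by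
    intro c
    rw [hD, PySem.Dict.getD_foldl_modify_append, PySem.Dict.getD_empty, List.nil_append,
      List.filter_map, List.map_map]
    simp only [Function.comp_def]
    exact (List.map_id _)
  -- the dict's keys are the distinct scores, in first-occurrence order
  have hkeys : D.keys = PySem.Set.ofList (vulns.map pvSc) := by
    rw [hD, PySem.Dict.keys_foldl_modify_key _ Prod.fst [] (fun d x => fun l => l ++ [x.2]),
      PySem.Dict.keys_empty, List.map_map]
    exact set_update_nil_eq_ofList _
  have hkeys_nodup : D.keys.Nodup := hkeys ▸ PySem.Set.nodup_ofList _
  have hkeys_mem : ∀ k : Int, k ∈ D.keys ↔ k ∈ vulns.map pvSc := by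
    intro k; rw [hkeys]; exact PySem.Set.mem_ofList _ _
  -- sorted(keys, reverse=True) is the descending enumeration of the present scores
  have hsorted : PySem.List.sorted D.keys (fun k => k) true
      = ([4, 3, 2, 1] : List Int).filter (fun k => decide (k ∈ D.keys)) := by
    apply PySem.List.sorted_rev_eq_of_perm_of_pairwise_gt
    · rw [List.perm_ext_iff_of_nodup
        (List.Nodup.filter _ (by decide)) hkeys_nodup]
      intro a
      simp only [List.mem_filter, decide_eq_true_eq]
      constructor
      · exact fun h => h.2
      · intro h
        refine ⟨?_, h⟩
        rcases List.mem_map.mp ((hkeys_mem a).mp h) with ⟨v, _, hv⟩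
        rw [← hv]
        rcases pvSc_range v with h' | h' | h' | h' <;> rw [h'] <;> decide
    · exact List.Pairwise.filter _ (by decide)
  rw [hsorted, PySem.List.foldl_append_eq_flatMap, List.nil_append]
  rw [flatMap_filter_of_empty _ _ _ (by
    intro k _ hk
    rw [hgetD]
    have : vulns.filter (fun v => pvSc v == k) = [] := by
      rw [List.filter_eq_nil_iff]
      intro v hv hvk
      apply absurd ((hkeys_mem k).mpr (List.mem_map.mpr ⟨v, hv, beq_iff_eq.mp hvk⟩))
      simpa using hk
    rw [this, List.take_nil])]
  rw [PySem.List.foldl_append_eq_flatMap, List.nil_append]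
  congr 1
  apply List.flatMap_congr
  intro k _
  rw [hgetD]
  congr 1
  apply List.filter_congr
  intro v hv
  obtain ⟨s, hs⟩ := pvGetSev?_isSome v (hpre v hv)
  simp only [hs, pvSc]
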